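-- pv_equiv track=rewrite | github.com/blakeohare/crayon | Libraries/Xml/native/lang-python/gen/lib_xml.py | lib_xml_error
-- ===== SOURCE A (Python) =====
-- def lib_xml_error(xml, index, msg):
--   loc = ""
--   if (index < len(xml)):
--     line = 1
--     col = 0
--     i = 0
--     while (i <= index):
--       if (xml[i] == "\n"):
--         line += 1
--         col = 0
--       else:
--         col += 1
--       i += 1
--     loc = ''.join([" on line ", str(line), ", col ", str(col)])
--   return ''.join(["XML parse error", loc, ": ", msg])
-- ===== SOURCE B (Python) =====
-- def lib_xml_error(xml, index, msg):
--   loc = ""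
--   if index < len(xml):
--     prefix = xml[:index + 1] if index >= 0 else ""
--     parts = prefix.split("\n")
--     loc = ''.join([" on line ", str(len(parts)), ", col ", str(len(parts[-1]))])
--   return ''.join(["XML parse error", loc, ": ", msg])
-- ===== Notes on version B (the rewrite author's own statement) =====
-- stated objective: simpler
-- what changed: Replaces A's per-character while loop with line/col counters and branches by slicing the prefix xml[:index+1] and splitting it on ' ': line = number of parts, col = length of the last part.
import Mathlib
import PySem

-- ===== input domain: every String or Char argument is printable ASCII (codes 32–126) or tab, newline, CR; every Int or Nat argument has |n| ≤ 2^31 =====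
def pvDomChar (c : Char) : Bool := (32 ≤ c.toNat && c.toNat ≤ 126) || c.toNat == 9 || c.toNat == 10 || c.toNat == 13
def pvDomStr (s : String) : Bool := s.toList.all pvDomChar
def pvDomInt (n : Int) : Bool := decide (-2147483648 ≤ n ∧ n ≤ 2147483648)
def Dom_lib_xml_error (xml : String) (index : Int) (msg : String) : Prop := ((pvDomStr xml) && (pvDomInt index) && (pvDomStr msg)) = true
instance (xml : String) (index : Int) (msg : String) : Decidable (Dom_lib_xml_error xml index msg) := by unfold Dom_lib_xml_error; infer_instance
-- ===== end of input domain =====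

-- B replaces A's per-character counting loop by slicing the prefix and splitting it on newlines
-- (line = number of parts, col = length of the last part): a simpler decomposition, same result.


-- ===== PORT A =====
-- A's while loop: i counts up while i <= index; xml[i] is pyGet? (the `none` branch is
-- Python's IndexError, unreachable here since the loop only runs with 0 ≤ i ≤ index < len).
def libXmlLoop (chars : List Char) (index : Int) (line : Int) (col : Int) (i : Int) : Int × Int :=
  if i ≤ index then
    match PySem.List.pyGet? chars i with
    | some c =>
        if c = '\n' then libXmlLoop chars index (line + 1) 0 (i + 1)
        else libXmlLoop chars index line (col + 1) (i + 1)
    | none => (line, col)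
  else (line, col)
  termination_by (index + 1 - i).toNat
  decreasing_by all_goals omega

def lib_xml_error (xml : String) (index : Int) (msg : String) : String :=
  let loc : String := ""
  let loc : String :=
    if index < PySem.Str.len xml then
      let lc := libXmlLoop xml.toList index 1 0 0
      PySem.Str.join "" [" on line ", PySem.Int.toStr lc.1, ", col ", PySem.Int.toStr lc.2]
    else loc
  PySem.Str.join "" ["XML parse error", loc, ": ", msg]

-- ===== PORT B =====
def lib_xml_error_alt (xml : String) (index : Int) (msg : String) : String :=
  let loc : String := ""
  let loc : String :=
    if index < PySem.Str.len xml then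
      let pre : String := if 0 ≤ index then PySem.Str.slice xml none (some (index + 1)) else ""
      let parts : List String := (PySem.Str.split? pre "\n").getD []    -- separator "\n" ≠ "", so split? is `some`
      let last : String := (PySem.List.pyGet? parts (-1)).getD ""       -- split returns ≥ 1 part, so parts[-1] is `some`
      PySem.Str.join "" [" on line ", PySem.Int.toStr (parts.length : Int), ", col ", PySem.Int.toStr (PySem.Str.len last)]
    else loc
  PySem.Str.join "" ["XML parse error", loc, ": ", msg]

-- ===== PRECONDITION & SPEC =====
def Spec_lib_xml_error (xml : String) (index : Int) (msg : String) (out : String) : Prop := out = lib_xml_error_alt xml index msg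
instance (xml : String) (index : Int) (msg : String) (out : String) : Decidable (Spec_lib_xml_error xml index msg out) := by unfold Spec_lib_xml_error; infer_instance

-- ===== CLAIM (what is proved, stated in full; the proofs are below) =====
def Claim_equal_lib_xml_error : Prop := ∀ (xml : String) (index : Int) (msg : String), Dom_lib_xml_error xml index msg → Spec_lib_xml_error xml index msg (lib_xml_error xml index msg)

-- ===== LEMMAS AND PROOFS =====

-- one step of A's loop body, as a fold function
def pvStep (p : Int × Int) (c : Char) : Int × Int :=
  if c = '\n' then (p.1 + 1, 0) else (p.1, p.2 + 1)

-- structural split-on-'\n' (reference model for Chars.splitOn with separator "\n")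
def pvSplitNl : List Char → List (List Char)
  | [] => [[]]
  | c :: rest =>
    if c = '\n' then [] :: pvSplitNl rest
    else
      match pvSplitNl rest with
      | [] => [[c]]
      | h :: t => (c :: h) :: t

lemma pvHeadTail {α : Type} (l : List α) [Inhabited α] (h : l ≠ []) : l.headI :: l.tail = l := by
  cases l with
  | nil => exact absurd rfl h
  | cons a t => rfl

lemma pvSplitNl_ne_nil (l : List Char) : pvSplitNl l ≠ [] := by
  cases l with
  | nil => simp [pvSplitNl]
  | cons c rest =>
    simp only [pvSplitNl]
    split
    · simp
    · split <;> simp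

lemma pvGo (l : List Char) : ∀ (fuel : Nat) (cur : List Char) (acc : List (List Char)),
    l.length ≤ fuel →
    PySem.Chars.splitOn.go ['\n'] fuel l cur acc =
      acc.reverse ++ ((cur.reverse ++ (pvSplitNl l).headI) :: (pvSplitNl l).tail) := by
  induction l with
  | nil =>
    intro fuel cur acc _
    cases fuel <;> simp [PySem.Chars.splitOn.go, pvSplitNl]
  | cons c rest ih =>
    intro fuel cur acc hf
    cases fuel with
    | zero => simp at hf
    | succ f =>
      rw [PySem.Chars.splitOn.go]
      by_cases hc : c = '\n'
      · subst hc
        rw [if_pos (by simp [List.isPrefixOf])]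
        rw [show List.drop ['\n'].length ('\n' :: rest) = rest from rfl]
        simp only [List.length_cons] at hf
        rw [ih f [] (cur.reverse :: acc) (by omega)]
        have hne := pvSplitNl_ne_nil rest
        have h2 : (pvSplitNl rest).headI :: (pvSplitNl rest).tail = pvSplitNl rest := pvHeadTail _ hne
        rw [show pvSplitNl ('\n' :: rest) = [] :: pvSplitNl rest from by simp [pvSplitNl]]
        simp [h2]
      · rw [if_neg (by simp [List.isPrefixOf]; exact Ne.symm hc)]
        simp only [List.length_cons] at hf
        rw [ih f (c :: cur) acc (by omega)]
        simp only [pvSplitNl, if_neg hc]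
        rcases hS : pvSplitNl rest with _ | ⟨h, t⟩
        · exact absurd hS (pvSplitNl_ne_nil rest)
        · simp [List.reverse_cons, List.append_assoc]

lemma pvSplitOn_eq (l : List Char) : PySem.Chars.splitOn l ['\n'] = pvSplitNl l := by
  rw [PySem.Chars.splitOn, pvGo l (l.length + 1) [] [] (by omega)]
  simp [pvHeadTail _ (pvSplitNl_ne_nil l)]

lemma pv_fold (l : List Char) : ∀ line col : Int,
    l.foldl pvStep (line, col) =
      (line + ((pvSplitNl l).length : Int) - 1,
       if (pvSplitNl l).length = 1 then col + ((pvSplitNl l).headI.length : Int)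
       else (((pvSplitNl l).getLast?.getD []).length : Int)) := by
  induction l with
  | nil => intro line col; simp [pvSplitNl]
  | cons c rest ih =>
    intro line col
    rw [List.foldl_cons]
    by_cases hc : c = '\n'
    · subst hc
      have hne := pvSplitNl_ne_nil rest
      rw [show pvStep (line, col) '\n' = (line + 1, 0) by simp [pvStep]]
      rw [ih (line + 1) 0]
      simp only [pvSplitNl, if_pos rfl]
      rcases hS : pvSplitNl rest with _ | ⟨h, t⟩
      · exact absurd hS hne
      · rcases t with _ | ⟨h2, t2⟩
        · simp only [List.length_cons, List.length_nil, List.length_singleton,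
            List.getLast?_cons_cons, List.getLast?_singleton, List.headI_cons, Option.getD_some]
          refine Prod.ext ?_ ?_ <;> simp <;> push_cast <;> omega
        · simp only [List.length_cons, List.getLast?_cons_cons]
          refine Prod.ext ?_ ?_ <;> simp <;> push_cast <;> omega
    · rw [show pvStep (line, col) c = (line, col + 1) by simp [pvStep, hc]]
      rw [ih line (col + 1)]
      simp only [pvSplitNl, if_neg hc]
      rcases hS : pvSplitNl rest with _ | ⟨h, t⟩
      · exact absurd hS (pvSplitNl_ne_nil rest)
      · rcases t with _ | ⟨h2, t2⟩
        · simp only [List.length_cons, List.length_nil, List.length_singleton, List.headI_cons]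
          refine Prod.ext ?_ ?_ <;> simp <;> push_cast <;> omega
        · simp [List.getLast?_cons_cons]

-- Python's parts[-1] is getLast? (none exactly when the list is empty)
lemma pvGet_neg_one {α : Type} (l : List α) : PySem.List.pyGet? l (-1) = l.getLast? := by
  cases l with
  | nil => simp [PySem.List.pyGet?, PySem.List.pyIdx?]
  | cons a t =>
    simp only [PySem.List.pyGet?, PySem.List.pyIdx?]
    rw [if_neg (by omega), if_pos (by simp)]
    simp only [Option.bind_some]
    rw [List.getLast?_eq_getElem?]
    norm_num

-- A's loop equals a left fold of pvStep over the prefix xml[0..index]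
lemma pvLoop_eq (chars : List Char) (index : Int) (hix : index < (chars.length : Int))
    (hpos : 0 ≤ index) :
    ∀ (n : Nat) (i line col : Int), 0 ≤ i → (index + 1 - i).toNat = n →
    libXmlLoop chars index line col i =
      ((chars.take (index.toNat + 1)).drop i.toNat).foldl pvStep (line, col) := by
  intro n
  induction n using Nat.strong_induction_on with
  | _ n ihn =>
    intro i line col hi hn
    rw [libXmlLoop]
    by_cases hle : i ≤ index
    · have hilen : i.toNat < chars.length := by omega
      have hget : PySem.List.pyGet? chars i = some chars[i.toNat] := by
        simp only [PySem.List.pyGet?, PySem.List.pyIdx?]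
        rw [if_pos hi, if_pos (by omega)]
        simp [List.getElem?_eq_getElem hilen]
      rw [if_pos hle, hget]
      simp only []
      have htk : i.toNat < (chars.take (index.toNat + 1)).length := by
        simp [List.length_take]; omega
      have hdrop : (chars.take (index.toNat + 1)).drop i.toNat =
          chars[i.toNat] :: (chars.take (index.toNat + 1)).drop (i.toNat + 1) := by
        rw [List.drop_eq_getElem_cons htk]
        congr 1
        simp [List.getElem_take]
      rw [hdrop, List.foldl_cons]
      have hnext : ((index + 1 - (i + 1)).toNat) < n := by omega
      have hi1 : (i + 1).toNat = i.toNat + 1 := by omega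
      by_cases hc : chars[i.toNat] = '\n'
      · rw [if_pos hc, ihn _ hnext (i + 1) (line + 1) 0 (by omega) rfl, hi1]
        simp [pvStep, hc]
      · rw [if_neg hc, ihn _ hnext (i + 1) line (col + 1) (by omega) rfl, hi1]
        simp [pvStep, hc]
    · rw [if_neg hle]
      rw [List.drop_of_length_le (by simp [List.length_take]; omega)]
      simp

-- for a nonempty list of parts, the "no newline yet" branch of pv_fold is still the last part
lemma pvCol (S : List (List Char)) (hne : S ≠ []) :
    (if S.length = 1 then (0 : Int) + ((S.headI.length : Nat) : Int) else ((S.getLast?.getD []).length : Int))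
      = ((S.getLast?.getD []).length : Int) := by
  rcases S with _ | ⟨h, t⟩
  · exact absurd rfl hne
  · rcases t with _ | ⟨h2, t2⟩
    · simp
    · simp

-- ===== VERDICT (by name: the statement is the Claim_ definition above) =====
theorem lib_xml_error_spec : Claim_equal_lib_xml_error := by
  intro xml index msg _
  unfold Spec_lib_xml_error lib_xml_error lib_xml_error_alt
  by_cases hlt : index < PySem.Str.len xml
  · simp only [if_pos hlt]
    have hlen : PySem.Str.len xml = (xml.toList.length : Int) := PySem.Str.len_eq xml
    by_cases hz : 0 ≤ index
    · -- 0 ≤ index < len xml : prefix is xml[0..index]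
      simp only [if_pos hz]
      have hpre : (PySem.Str.slice xml none (some (index + 1))).toList
          = xml.toList.take (index.toNat + 1) := by
        rw [PySem.Str.toList_slice, PySem.Chars.slice_eq_listSlice,
          PySem.List.slice_to _ (by omega : (0:Int) ≤ index + 1)]
        congr 1
        omega
      obtain ⟨L, hL, hLmap⟩ : ∃ L, PySem.Str.split? (PySem.Str.slice xml none (some (index + 1))) "\n" = some L ∧
          L.map String.toList = pvSplitNl (xml.toList.take (index.toNat + 1)) := by
        have h := PySem.Str.split?_map (PySem.Str.slice xml none (some (index + 1))) "\n"
        rw [show ("\n" : String).toList = ['\n'] from rfl, PySem.Chars.split?] at h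
        rw [if_neg (by simp)] at h
        rw [hpre, pvSplitOn_eq] at h
        cases hE : PySem.Str.split? (PySem.Str.slice xml none (some (index + 1))) "\n" with
        | none => rw [hE] at h; simp at h
        | some L => rw [hE] at h; exact ⟨L, rfl, by simpa using h⟩
      rw [hL]
      have hLne : L ≠ [] := by
        intro hnil
        rw [hnil] at hLmap
        exact pvSplitNl_ne_nil _ hLmap.symm
      have hloop : libXmlLoop xml.toList index 1 0 0 =
          ((L.length : Int), PySem.Str.len ((PySem.List.pyGet? L (-1)).getD "")) := by
        rw [pvLoop_eq xml.toList index (by omega) hz _ 0 1 0 le_rfl rfl]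
        simp only [Int.toNat_zero, List.drop_zero]
        rw [pv_fold]
        have hlen2 : (pvSplitNl (xml.toList.take (index.toNat + 1))).length = L.length := by
          rw [← hLmap, List.length_map]
        rw [pvGet_neg_one]
        rcases hlast : L.getLast? with _ | s
        · exact absurd (List.getLast?_eq_none_iff.mp hlast) hLne
        · have hgl : (pvSplitNl (xml.toList.take (index.toNat + 1))).getLast? = some s.toList := by
            rw [← hLmap, List.getLast?_map, hlast, Option.map_some]
          rw [pvCol _ (pvSplitNl_ne_nil _), hgl, hlen2]
          simp [PySem.Str.len_eq]
      rw [hloop]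
      rfl
    · -- index < 0 : A's loop body never runs; B takes the empty prefix
      simp only [if_neg hz]
      rw [libXmlLoop, if_neg (by omega)]
      rfl
  · simp only [if_neg hlt]
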